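-- pv_equiv track=rewrite | github.com/turdoxxx/translation-bot | helpers/Keyboard.py | CROVET_LIST_ITEMS
-- ===== SOURCE A (Python) =====
-- def CROVET_LIST_ITEMS(Dictes: dict, count_list: int):
--     LISTS = []
--     new_dict = {}
--     [new_dict.update({k:i}) for k,i in enumerate(Dictes)]
--
--     # starty loop
--     Items_id = 0
--     for ii in range(int(len(new_dict)/count_list)+1):
--         Lis = []
--         # check
--         if len(new_dict)-Items_id < count_list:
--             if len(new_dict)-Items_id == 0:
--                 break
--             for i in range(len(new_dict)-Items_id):
--                 Lis.append(new_dict[Items_id])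
--                 Items_id+=1
--             LISTS.append(Lis)
--
--             break
--
--         for i in range(count_list):
--             Lis.append(new_dict[Items_id])
--             Items_id+=1
--         LISTS.append(Lis)
--
--     return LISTS
-- ===== SOURCE B (Python) =====
-- def CROVET_LIST_ITEMS(Dictes: dict, count_list: int):
--     keys = list(Dictes)
--     return [keys[i:i + count_list] for i in range(0, len(keys), count_list)]
-- ===== Notes on version B (the rewrite author's own statement) =====
-- stated objective: simpler
-- what changed: B replaces A's fuel-counted loop with an Items_id counter, dict-rebuild lookup table and special last-partial-chunk branch by a single slice-striding comprehension over range(0, len(keys), count_list).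
-- outside the precondition, e.g. on CROVET_LIST_ITEMS({'a': '1'}, -2): A returns [[]], B returns []; on CROVET_LIST_ITEMS({'a': '1'}, 0): A raises ZeroDivisionError, B raises ValueError
import Mathlib
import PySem

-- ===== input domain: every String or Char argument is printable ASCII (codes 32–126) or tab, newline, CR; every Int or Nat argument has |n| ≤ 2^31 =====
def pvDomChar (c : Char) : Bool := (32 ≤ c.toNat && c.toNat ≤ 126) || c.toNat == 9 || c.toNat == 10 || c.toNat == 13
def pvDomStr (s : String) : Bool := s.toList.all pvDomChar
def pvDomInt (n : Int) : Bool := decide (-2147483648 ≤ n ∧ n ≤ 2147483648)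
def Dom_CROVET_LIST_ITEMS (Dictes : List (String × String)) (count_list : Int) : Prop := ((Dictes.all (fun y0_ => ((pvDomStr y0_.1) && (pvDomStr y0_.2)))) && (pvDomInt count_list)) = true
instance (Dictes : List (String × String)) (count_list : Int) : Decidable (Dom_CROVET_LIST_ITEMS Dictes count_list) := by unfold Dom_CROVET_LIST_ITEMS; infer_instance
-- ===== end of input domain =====

-- B replaces A's counter loop + rebuilt index dict + special partial-chunk branch by one slice-striding
-- comprehension; same O(n) cost, just simpler (Pre_ restricts to the natural domain count_list ≥ 1).

-- ===== PORT A =====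
-- the 'for ii in range(...)' loop: fuel list = the range; Items_id and LISTS are the two accumulators;
-- 'break' = returning the accumulator without consuming more fuel. new_dict[Items_id] is ported as
-- getD with default "" — inside Pre_ the key is always present (proved below), so this is exact there.
def CROVET_loopA (nd : PySem.Dict Int String) (n count : Int) :
    List Int → Int → List (List String) → List (List String)
  | [], _, lists => lists
  | _ :: rest, itemsId, lists =>
    if n - itemsId < count then
      if n - itemsId = 0 then lists
      else
        let r := (PySem.List.pyRange 0 (n - itemsId)).foldl
          (fun (s : List String × Int) _ => (s.1 ++ [nd.getD s.2 ""], s.2 + 1)) ([], itemsId)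
        lists ++ [r.1]
    else
      let r := (PySem.List.pyRange 0 count).foldl
        (fun (s : List String × Int) _ => (s.1 ++ [nd.getD s.2 ""], s.2 + 1)) ([], itemsId)
      CROVET_loopA nd n count rest r.2 (lists ++ [r.1])

-- int(len(new_dict)/count_list) is truncating division (PySem.Int.truncdiv; exact here: |values| < 2^53).
-- Python raises ZeroDivisionError when count_list = 0 (outside Pre_); the 'if count_list = 0' guard only makes the port total.
def CROVET_LIST_ITEMS (Dictes : List (String × String)) (count_list : Int) : List (List String) :=
  let keys := (PySem.Dict.ofList Dictes).keys
  let nd : PySem.Dict Int String :=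
    (PySem.List.enumerate keys 0).foldl (fun d p => d.insert p.1 p.2) PySem.Dict.empty
  let n : Int := (nd.size : Int)
  if count_list = 0 then []
  else
    CROVET_loopA nd n count_list
      (PySem.List.pyRange 0 (PySem.Int.truncdiv n count_list + 1)) 0 []

-- ===== PORT B =====
-- Python raises ValueError (range step 0) when count_list = 0 (outside Pre_); the guard only makes the port total.
def CROVET_LIST_ITEMS_alt (Dictes : List (String × String)) (count_list : Int) : List (List String) :=
  let keys := (PySem.Dict.ofList Dictes).keys
  if count_list = 0 then []
  else
    (PySem.List.pyRange 0 (PySem.List.len keys) count_list).map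
      (fun i => PySem.List.slice keys (some i) (some (i + count_list)))

-- ===== PRECONDITION & SPEC =====
-- Pre_ keeps the natural domain: count_list ≥ 1. It excludes count_list = 0, where A raises
-- ZeroDivisionError, and negative count_list, outside the natural domain of a chunk size, where A's
-- values ([[]] or []) are accidents of its float-division fuel bound.
def Pre_CROVET_LIST_ITEMS (Dictes : List (String × String)) (count_list : Int) : Prop :=
  1 ≤ count_list
instance (Dictes : List (String × String)) (count_list : Int) : Decidable (Pre_CROVET_LIST_ITEMS Dictes count_list) := by unfold Pre_CROVET_LIST_ITEMS; infer_instance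
def pvWitness_CROVET_LIST_ITEMS : (List (String × String)) × Int :=
  ([("a", "1"), ("b", "2"), ("c", "3")], 2)
def Spec_CROVET_LIST_ITEMS (Dictes : List (String × String)) (count_list : Int) (out : List (List String)) : Prop := out = CROVET_LIST_ITEMS_alt Dictes count_list
instance (Dictes : List (String × String)) (count_list : Int) (out : List (List String)) : Decidable (Spec_CROVET_LIST_ITEMS Dictes count_list out) := by unfold Spec_CROVET_LIST_ITEMS; infer_instance

-- ===== CLAIM (what is proved, stated in full; the proofs are below) =====
def Claim_equal_CROVET_LIST_ITEMS : Prop := ∀ (Dictes : List (String × String)) (count_list : Int), Dom_CROVET_LIST_ITEMS Dictes count_list → Pre_CROVET_LIST_ITEMS Dictes count_list → Spec_CROVET_LIST_ITEMS Dictes count_list (CROVET_LIST_ITEMS Dictes count_list)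

-- ===== LEMMAS AND PROOFS =====

-- range(a, b, s) with positive step s, a < b, starts with a (no PySem lemma has this cons form for step ≠ 1)
lemma pyRange_pos_cons (a b s : Int) (hs : 0 < s) (hab : a < b) :
    PySem.List.pyRange a b s = a :: PySem.List.pyRange (a + s) b s := by
  rw [PySem.List.pyRange_of_pos _ _ hs, PySem.List.pyRange_of_pos _ _ hs, if_pos hab]
  have hdiv : (b - a + s - 1) / s = (b - a - 1) / s + 1 := by
    have : b - a + s - 1 = (b - a - 1) + 1 * s := by ring
    rw [this, Int.add_mul_ediv_right _ _ (by omega)]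
  have hq : 0 ≤ (b - a - 1) / s := Int.ediv_nonneg (by omega) (by omega)
  by_cases h2 : a + s < b
  · rw [if_pos h2]
    have : b - (a + s) + s - 1 = b - a - 1 := by ring
    rw [this]
    have hcnt : (b - a + s - 1) / s = (b - a - 1) / s + 1 := hdiv
    rw [hcnt]
    have : ((b - a - 1) / s + 1).toNat = ((b - a - 1) / s).toNat + 1 := by omega
    rw [this, List.range_succ_eq_map, List.map_cons, List.map_map]
    congr 1
    · simp
    · apply List.map_congr_left
      intro k _
      simp only [Function.comp_apply, Nat.succ_eq_add_one]
      push_cast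
      ring
  · rw [if_neg h2]
    have h0 : (b - a - 1) / s = 0 := Int.ediv_eq_zero_of_lt (by omega) (by omega)
    rw [hdiv, h0]
    simp
lemma pyRange_pos_nil (a b s : Int) (hs : 0 < s) (hab : b ≤ a) :
    PySem.List.pyRange a b s = [] := by
  rw [PySem.List.pyRange_of_pos _ _ hs, if_neg (by omega)]
  simp

-- the inner append loop builds f start, f (start+1), … and advances the counter by m
lemma foldl_range_build (f : Int → String) (m : Nat) : ∀ (start : Int) (acc : List String),
    (List.range m).foldl (fun (s : List String × Int) _ => (s.1 ++ [f s.2], s.2 + 1)) (acc, start)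
      = (acc ++ (List.range m).map (fun (j : Nat) => f (start + (j : Int))), start + m) := by
  induction m with
  | zero => intro start acc; simp
  | succ m ih =>
    intro start acc
    rw [List.range_succ, List.foldl_append, ih, List.map_append]
    simp only [List.foldl_cons, List.foldl_nil, List.map_cons, List.map_nil, Prod.mk.injEq]
    exact ⟨by simp, by push_cast; ring⟩

lemma inner_chunk (nd : PySem.Dict Int String) (k start : Int) (hk : 0 ≤ k) :
    (PySem.List.pyRange 0 k).foldl
        (fun (s : List String × Int) _ => (s.1 ++ [nd.getD s.2 ""], s.2 + 1)) ([], start)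
      = ((List.range k.toNat).map (fun (j : Nat) => nd.getD (start + (j : Int)) ""), start + k) := by
  rw [PySem.List.pyRange_one, List.foldl_map]
  simp only [Int.sub_zero]
  rw [foldl_range_build (fun i => nd.getD i "") k.toNat start []]
  simp only [List.nil_append, Prod.mk.injEq]
  exact ⟨by simp, by omega⟩

-- a consecutive block of lookups is a take-of-drop of keys
lemma block_eq_take_drop (keys : List String) (g : Int → String)
    (hg : ∀ i : Int, 0 ≤ i → g i = PySem.List.pyGetD keys i "")
    (start k : Int) (h0 : 0 ≤ start) (_hk : 0 ≤ k) (hend : start + k ≤ (keys.length : Int)) :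
    (List.range k.toNat).map (fun (j : Nat) => g (start + (j : Int)))
      = (keys.drop start.toNat).take k.toNat := by
  apply List.ext_getElem
  · simp; omega
  · intro j hj1 hj2
    simp only [List.length_map, List.length_range] at hj1
    simp only [List.getElem_map, List.getElem_range, List.getElem_take, List.getElem_drop]
    rw [hg _ (by omega),
        PySem.List.pyGetD_eq_getElem keys "" (by omega) (by omega)]
    congr 1
    omega

-- main loop invariant: with enough fuel, A's loop emits exactly B's remaining slices
lemma outer_spec (nd : PySem.Dict Int String) (keys : List String) (c : Int) (hc : 1 ≤ c)
    (hg : ∀ i : Int, 0 ≤ i → nd.getD i "" = PySem.List.pyGetD keys i "") :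
    ∀ (fl : List Int) (start : Int) (lists : List (List String)),
      0 ≤ start → start ≤ (keys.length : Int) →
      (keys.length : Int) - start < (fl.length : Int) * c →
      CROVET_loopA nd (keys.length : Int) c fl start lists
        = lists ++ (PySem.List.pyRange start (keys.length : Int) c).map
            (fun i => PySem.List.slice keys (some i) (some (i + c))) := by
  intro fl
  induction fl with
  | nil => intro start lists h0 h1 h2; simp at h2; omega
  | cons x rest ih =>
    intro start lists h0 h1 h2
    by_cases hlt : (keys.length : Int) - start < c
    · by_cases heq : (keys.length : Int) - start = 0
      · rw [CROVET_loopA, if_pos hlt, if_pos heq, pyRange_pos_nil _ _ _ (by omega) (by omega)]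
        simp
      · rw [CROVET_loopA, if_pos hlt, if_neg heq,
            inner_chunk nd _ _ (by omega),
            block_eq_take_drop keys _ hg start _ h0 (by omega) (by omega),
            pyRange_pos_cons start _ c (by omega) (by omega),
            pyRange_pos_nil _ _ _ (by omega) (by omega)]
        simp only [List.map_cons, List.map_nil]
        rw [PySem.List.slice_toNat keys h0 (by omega)]
        rw [List.take_of_length_le (by simp; omega), List.take_of_length_le (by simp; omega)]
    · rw [CROVET_loopA, if_neg hlt,
          inner_chunk nd _ _ (by omega),
          block_eq_take_drop keys _ hg start c (by omega) (by omega) (by omega)]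
      simp only
      rw [ih (start + c) (lists ++ [(keys.drop start.toNat).take c.toNat]) (by omega) (by omega)
            (by
              have hx : (((x :: rest).length : Nat) : Int) * c = (((rest.length : Nat)) : Int) * c + c := by
                simp only [List.length_cons]; push_cast; ring
              omega),
          pyRange_pos_cons start _ c (by omega) (by omega)]
      simp only [List.map_cons, List.append_assoc, List.cons_append, List.nil_append]
      rw [PySem.List.slice_toNat keys h0 (by omega)]
      have : (start + c).toNat - start.toNat = c.toNat := by omega
      rw [this]

-- the rebuilt dict {index: key}: its items are exactly the enumeration of keys
lemma build_items (keys : List String) :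
    ((PySem.List.enumerate keys 0).foldl (fun d p => d.insert p.1 p.2)
        (PySem.Dict.empty : PySem.Dict Int String)).items
      = PySem.List.enumerate keys 0 := by
  have h := PySem.Dict.items_foldl_insert_fresh (PySem.List.enumerate keys 0)
      (fun p => p.1) (fun p => p.2) (PySem.Dict.empty : PySem.Dict Int String)
      (fun a _ => PySem.Dict.contains_empty _)
      (by rw [PySem.List.map_fst_enumerate]; exact PySem.List.nodup_pyRange_one _ _)
  simpa using h

lemma build_getD (keys : List String) (i : Int) (h0 : 0 ≤ i) :
    ((PySem.List.enumerate keys 0).foldl (fun d p => d.insert p.1 p.2)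
        (PySem.Dict.empty : PySem.Dict Int String)).getD i ""
      = PySem.List.pyGetD keys i "" := by
  set nd := (PySem.List.enumerate keys 0).foldl (fun d p => d.insert p.1 p.2)
      (PySem.Dict.empty : PySem.Dict Int String) with hnd
  have hitems : nd.items = PySem.List.enumerate keys 0 := build_items keys
  have hkeys : nd.keys = PySem.List.pyRange 0 (keys.length : Int) := by
    show nd.items.map (·.1) = _
    rw [hitems]
    have := PySem.List.map_fst_enumerate keys 0
    simpa using this
  have hnodup : nd.keys.Nodup := by rw [hkeys]; exact PySem.List.nodup_pyRange_one _ _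
  by_cases hin : i < (keys.length : Int)
  · have hk : i.toNat < keys.length := by omega
    have hmem : (i, keys[i.toNat]) ∈ nd.items := by
      rw [hitems, PySem.List.mem_enumerate_iff]
      exact ⟨i.toNat, hk, by simp; omega⟩
    rw [PySem.Dict.getD_of_mem_items nd hmem hnodup,
        PySem.List.pyGetD_eq_getElem keys "" h0 (by omega)]
  · have hnc : nd.contains i = false := by
      by_contra h
      have : nd.contains i = true := by revert h; cases nd.contains i <;> simp
      rw [PySem.Dict.contains_iff_mem_keys, hkeys, PySem.List.mem_pyRange_one] at this
      omega
    rw [PySem.Dict.getD_of_not_contains nd "" hnc,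
        PySem.List.pyGetD_of_nonneg keys "" h0, List.getD_eq_default]
    omega

-- int(n / c) = n // c on the nonnegative domain used here
lemma truncdiv_nonneg (n c : Int) (hn : 0 ≤ n) (_hc : 1 ≤ c) :
    PySem.Int.truncdiv n c = n / c := by
  show n.tdiv c = n / c
  rw [Int.tdiv_eq_ediv]
  simp
  omega

-- ===== VERDICT (by name: the statement is the Claim_ definition above) =====
theorem CROVET_LIST_ITEMS_spec : Claim_equal_CROVET_LIST_ITEMS := by
  intro Dictes c _ hpre
  have hc : 1 ≤ c := hpre
  show CROVET_LIST_ITEMS Dictes c = CROVET_LIST_ITEMS_alt Dictes c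
  unfold CROVET_LIST_ITEMS CROVET_LIST_ITEMS_alt
  simp only [if_neg (by omega : ¬ c = 0)]
  set keys := (PySem.Dict.ofList Dictes).keys with hk
  set nd := (PySem.List.enumerate keys 0).foldl (fun d p => d.insert p.1 p.2)
      (PySem.Dict.empty : PySem.Dict Int String) with hnd
  have hsize : (nd.size : Int) = (keys.length : Int) := by
    show ((nd.items.length : Nat) : Int) = _
    rw [build_items keys, PySem.List.length_enumerate]
  rw [hsize, PySem.List.len_eq]
  have hq : 0 ≤ (keys.length : Int) / c := Int.ediv_nonneg (by omega) (by omega)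
  have hmul : ((keys.length : Int) / c + 1) * c = c * ((keys.length : Int) / c) + c := by ring
  have hmod := Int.mul_ediv_add_emod (keys.length : Int) c
  have hmlt := Int.emod_lt_of_pos (keys.length : Int) (show (0:Int) < c by omega)
  apply outer_spec nd keys c hc (fun i h0 => build_getD keys i h0)
      _ 0 [] (by omega) (by omega)
  rw [PySem.List.length_pyRange_one, truncdiv_nonneg _ _ (by omega) hc]
  have hcast : ((((keys.length : Int) / c + 1 - 0).toNat : Nat) : Int) = (keys.length : Int) / c + 1 := by
    omega
  rw [hcast, hmul]
  omega
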